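-- pv_equiv track=rewrite | github.com/Hyeon-Yeong/ML_PA | code/project_modified.py | adjust_j
-- ===== SOURCE A (Python) =====
-- def adjust_j(matrix, i, j, condition_value, on_edge_increment):
--     if j < 0 or j >= 40:  # Ensure within bounds
--         return j
--     if matrix[i][j] == condition_value or j == 0:
--         if j != 0 and on_edge_increment:
--             return j + 1
--         return j
--     return adjust_j(matrix, i, j - 1, condition_value, on_edge_increment)
-- ===== SOURCE B (Python) =====
-- def adjust_j(matrix, i, j, condition_value, on_edge_increment):
--     if j < 0 or j >= 40:  # Ensure within bounds
--         return j
--     while j != 0 and matrix[i][j] != condition_value: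
--         j -= 1
--     if j != 0 and on_edge_increment:
--         return j + 1
--     return j
-- ===== Notes on version B (the rewrite author's own statement) =====
-- stated objective: idiomatic
-- what changed: The tail recursion is rewritten as an explicit while loop that scans leftward, with the edge increment applied once after the loop (a nonzero stop index can only be a condition match).
import Mathlib
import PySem

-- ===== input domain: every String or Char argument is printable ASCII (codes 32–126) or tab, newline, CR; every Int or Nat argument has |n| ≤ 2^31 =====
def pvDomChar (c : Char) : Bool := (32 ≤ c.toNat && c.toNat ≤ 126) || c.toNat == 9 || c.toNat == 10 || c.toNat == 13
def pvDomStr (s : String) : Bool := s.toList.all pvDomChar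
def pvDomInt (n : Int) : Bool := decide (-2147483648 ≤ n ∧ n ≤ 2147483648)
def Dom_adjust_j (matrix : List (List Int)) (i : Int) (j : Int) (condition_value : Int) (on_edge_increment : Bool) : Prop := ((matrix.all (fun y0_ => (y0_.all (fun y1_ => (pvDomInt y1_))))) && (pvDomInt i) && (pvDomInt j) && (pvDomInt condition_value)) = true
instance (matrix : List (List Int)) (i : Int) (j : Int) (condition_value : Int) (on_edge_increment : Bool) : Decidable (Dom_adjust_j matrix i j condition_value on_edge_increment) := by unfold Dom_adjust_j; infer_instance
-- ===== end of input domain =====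

-- ===== PORT A =====
-- B rewrites A's tail recursion as a while loop; return values agree on Pre_ (where Python A returns).
def adjust_j (matrix : List (List Int)) (i : Int) (j : Int) (condition_value : Int) (on_edge_increment : Bool) : Int :=
  if j < 0 ∨ 40 ≤ j then j
  else
    let v := (PySem.List.pyGet? ((PySem.List.pyGet? matrix i).getD []) j).getD 0
    if v = condition_value ∨ j = 0 then
      if j ≠ 0 ∧ on_edge_increment then j + 1 else j
    else adjust_j matrix i (j - 1) condition_value on_edge_increment
termination_by j.toNat
decreasing_by
  rename_i h1 h2
  simp at h1
  omega

-- ===== PORT B =====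
-- the while loop of Source B: scan leftward from column n while nonzero and no match
def adjWhile (row : List Int) (condition_value : Int) : Nat → Nat
  | 0 => 0
  | n + 1 =>
    if (PySem.List.pyGet? row ((n : Int) + 1)).getD 0 ≠ condition_value then adjWhile row condition_value n
    else n + 1

def adjust_j_alt (matrix : List (List Int)) (i : Int) (j : Int) (condition_value : Int) (on_edge_increment : Bool) : Int :=
  if j < 0 ∨ 40 ≤ j then j
  else
    let row := (PySem.List.pyGet? matrix i).getD []
    let stop : Int := (adjWhile row condition_value j.toNat : Nat)
    if stop ≠ 0 ∧ on_edge_increment then stop + 1 else stop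

-- ===== PRECONDITION & SPEC =====
-- Pre_ excludes exactly the inputs where Python A raises IndexError: 0 ≤ j < 40 but
-- matrix[i] is out of range or row i is not longer than j.
def Pre_adjust_j (matrix : List (List Int)) (i : Int) (j : Int) (condition_value : Int) (on_edge_increment : Bool) : Prop :=
  j < 0 ∨ 40 ≤ j ∨ ((PySem.List.pyGet? matrix i).isSome ∧ j < (((PySem.List.pyGet? matrix i).getD []).length : Int))
instance (matrix : List (List Int)) (i : Int) (j : Int) (condition_value : Int) (on_edge_increment : Bool) : Decidable (Pre_adjust_j matrix i j condition_value on_edge_increment) := by unfold Pre_adjust_j; infer_instance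
def pvWitness_adjust_j : List (List Int) × Int × Int × Int × Bool := ([[1, 2, 3, 4]], 0, 3, 2, true)

def Spec_adjust_j (matrix : List (List Int)) (i : Int) (j : Int) (condition_value : Int) (on_edge_increment : Bool) (out : Int) : Prop := out = adjust_j_alt matrix i j condition_value on_edge_increment
instance (matrix : List (List Int)) (i : Int) (j : Int) (condition_value : Int) (on_edge_increment : Bool) (out : Int) : Decidable (Spec_adjust_j matrix i j condition_value on_edge_increment out) := by unfold Spec_adjust_j; infer_instance

-- ===== CLAIM (what is proved, stated in full; the proofs are below) =====
def Claim_equal_adjust_j : Prop := ∀ (matrix : List (List Int)) (i : Int) (j : Int) (condition_value : Int) (on_edge_increment : Bool), Dom_adjust_j matrix i j condition_value on_edge_increment → Pre_adjust_j matrix i j condition_value on_edge_increment → Spec_adjust_j matrix i j condition_value on_edge_increment (adjust_j matrix i j condition_value on_edge_increment)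

-- ===== LEMMAS AND PROOFS =====
lemma adjust_j_eq_alt_nat (matrix : List (List Int)) (i : Int) (condition_value : Int)
    (on_edge_increment : Bool) (n : Nat) (hn : n < 40) :
    adjust_j matrix i (n : Int) condition_value on_edge_increment =
      adjust_j_alt matrix i (n : Int) condition_value on_edge_increment := by
  induction n with
  | zero =>
    simp [adjust_j, adjust_j_alt, adjWhile]
  | succ m ih =>
    have hm : m < 40 := by omega
    rw [adjust_j, adjust_j_alt]
    have hg : ¬((m : Int) + 1 < 0 ∨ 40 ≤ (m : Int) + 1) := by push_cast; omega
    simp only [Nat.cast_add, Nat.cast_one, if_neg hg]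
    by_cases hv : (PySem.List.pyGet? ((PySem.List.pyGet? matrix i).getD []) ((m : Int) + 1)).getD 0 = condition_value
    · have hs : adjWhile ((PySem.List.pyGet? matrix i).getD []) condition_value (((m : Int) + 1).toNat) = m + 1 := by
        have : ((m : Int) + 1).toNat = m + 1 := by omega
        rw [this, adjWhile]
        simp [hv]
      simp only [hs, hv]
      have hnz : ((m : Int) + 1) ≠ 0 := by omega
      simp [hnz]
    · have hs : adjWhile ((PySem.List.pyGet? matrix i).getD []) condition_value (((m : Int) + 1).toNat) =
          adjWhile ((PySem.List.pyGet? matrix i).getD []) condition_value m := by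
        have : ((m : Int) + 1).toNat = m + 1 := by omega
        rw [this, adjWhile]
        simp [hv]
      have hnz : ¬((PySem.List.pyGet? ((PySem.List.pyGet? matrix i).getD []) ((m : Int) + 1)).getD 0 = condition_value ∨ (m : Int) + 1 = 0) := by
        push_neg
        exact ⟨hv, by omega⟩
      simp only [if_neg hnz, hs]
      have hj : (m : Int) + 1 - 1 = (m : Int) := by ring
      rw [hj, ih hm, adjust_j_alt]
      have hg2 : ¬((m : Int) < 0 ∨ 40 ≤ (m : Int)) := by push_cast; omega
      simp only [if_neg hg2]
      have : ((m : Int)).toNat = m := by omega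
      rw [this]

-- ===== VERDICT (by name: the statement is the Claim_ definition above) =====
theorem adjust_j_spec : Claim_equal_adjust_j := by
  intro matrix i j condition_value on_edge_increment _ _
  unfold Spec_adjust_j
  by_cases hg : j < 0 ∨ 40 ≤ j
  · rw [adjust_j, adjust_j_alt, if_pos hg, if_pos hg]
  · have h0 : 0 ≤ j ∧ j < 40 := by push_neg at hg; omega
    have hj : j = (j.toNat : Int) := by omega
    rw [hj]
    exact adjust_j_eq_alt_nat matrix i condition_value on_edge_increment j.toNat (by omega)
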